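-- pv_equiv track=rewrite | github.com/abhijit-amazatic/EcoFarmBe | src/integration/inventory.py | get_parent_category
-- ===== SOURCE A (Python) =====
-- def get_parent_category(category_name):
--     """
--     Return parent category name.
--     """
--     category_dict = {
--         'Wholesale - Flower': [
--             'Tops', 'Tops - THC', 'Smalls', 'In the Field',
--             'Flower - Tops',
--             'Flower - Small',
--             'Flower - Bucked Untrimmed',
--             'Flower - Bucked Untrimmed - Seeded',
--             'Flower - Bucked Untrimmed - Contaminated'],
--         'Wholesale - Trim': ['Trim - THC', 'Trim - CBD', 'Trim'],
--         'Bucked Untrimmed': ['Bucked Untrimmed'],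
--         'Wholesale - Concentrates': [
--             'Crude Oil',
--             'Crude Oil - THC',
--             'Crude Oil - CBD',
--             'Distillate Oil',
--             'Distillate Oil - THC',
--             'Distillate Oil - THC - First Pass',
--             'Distillate Oil - THC - Second Pass',
--             'Distillate Oil - CBD',
--             'Shatter',
--             'Sauce',
--             'Crumbe',
--             'Crumble',
--             'Kief',
--             'Hash'],
--         'Waste': ['Distillate Waste'],
--         'Lab Testing': ['Lab Testing'],
--         'Wholesale - Terpenes': ['Terpenes - Cultivar Specific', 'Terpenes - Cultivar Blended'],
--         'Wholesale - Isolates': [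
--             'Isolates - CBD',
--             'Isolates - THC',
--             'Isolates - CBG',
--             'Isolates - CBN'],
--         'Services': ['QC', 'Transport', 'Secure Cash Handling', 'Services'],
--         'Packaged Goods': ['Packaged Goods'],}
--     for k, v in category_dict.items():
--         if category_name in v:
--             return k
--     if category_name in category_dict.keys():
--         return category_name
--     return None
-- ===== SOURCE B (Python) =====
-- # One precomputed flat lookup table (child-or-key -> parent), resolved with a single dict.get.
-- PARENT_OF = {
--     'Tops': 'Wholesale - Flower',
--     'Tops - THC': 'Wholesale - Flower',
--     'Smalls': 'Wholesale - Flower',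
--     'In the Field': 'Wholesale - Flower',
--     'Flower - Tops': 'Wholesale - Flower',
--     'Flower - Small': 'Wholesale - Flower',
--     'Flower - Bucked Untrimmed': 'Wholesale - Flower',
--     'Flower - Bucked Untrimmed - Seeded': 'Wholesale - Flower',
--     'Flower - Bucked Untrimmed - Contaminated': 'Wholesale - Flower',
--     'Trim - THC': 'Wholesale - Trim',
--     'Trim - CBD': 'Wholesale - Trim',
--     'Trim': 'Wholesale - Trim',
--     'Bucked Untrimmed': 'Bucked Untrimmed',
--     'Crude Oil': 'Wholesale - Concentrates',
--     'Crude Oil - THC': 'Wholesale - Concentrates',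
--     'Crude Oil - CBD': 'Wholesale - Concentrates',
--     'Distillate Oil': 'Wholesale - Concentrates',
--     'Distillate Oil - THC': 'Wholesale - Concentrates',
--     'Distillate Oil - THC - First Pass': 'Wholesale - Concentrates',
--     'Distillate Oil - THC - Second Pass': 'Wholesale - Concentrates',
--     'Distillate Oil - CBD': 'Wholesale - Concentrates',
--     'Shatter': 'Wholesale - Concentrates',
--     'Sauce': 'Wholesale - Concentrates',
--     'Crumbe': 'Wholesale - Concentrates',
--     'Crumble': 'Wholesale - Concentrates',
--     'Kief': 'Wholesale - Concentrates',
--     'Hash': 'Wholesale - Concentrates',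
--     'Distillate Waste': 'Waste',
--     'Lab Testing': 'Lab Testing',
--     'Terpenes - Cultivar Specific': 'Wholesale - Terpenes',
--     'Terpenes - Cultivar Blended': 'Wholesale - Terpenes',
--     'Isolates - CBD': 'Wholesale - Isolates',
--     'Isolates - THC': 'Wholesale - Isolates',
--     'Isolates - CBG': 'Wholesale - Isolates',
--     'Isolates - CBN': 'Wholesale - Isolates',
--     'QC': 'Services',
--     'Transport': 'Services',
--     'Secure Cash Handling': 'Services',
--     'Services': 'Services',
--     'Packaged Goods': 'Packaged Goods',
--     'Wholesale - Flower': 'Wholesale - Flower',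
--     'Wholesale - Trim': 'Wholesale - Trim',
--     'Wholesale - Concentrates': 'Wholesale - Concentrates',
--     'Waste': 'Waste',
--     'Wholesale - Terpenes': 'Wholesale - Terpenes',
--     'Wholesale - Isolates': 'Wholesale - Isolates',
-- }
--
--
-- def get_parent_category(category_name):
--     """
--     Return parent category name.
--     """
--     return PARENT_OF.get(category_name)
-- ===== Notes on version B (the rewrite author's own statement) =====
-- stated objective: simpler
-- what changed: B replaces A's per-call loop over a nested parent->children dict (with a key fallback and None default) by a single precomputed flat child-or-key->parent table consulted with one dict.get; this is correct because children are unique across parents and every key is entered mapping to itself.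
import Mathlib
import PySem

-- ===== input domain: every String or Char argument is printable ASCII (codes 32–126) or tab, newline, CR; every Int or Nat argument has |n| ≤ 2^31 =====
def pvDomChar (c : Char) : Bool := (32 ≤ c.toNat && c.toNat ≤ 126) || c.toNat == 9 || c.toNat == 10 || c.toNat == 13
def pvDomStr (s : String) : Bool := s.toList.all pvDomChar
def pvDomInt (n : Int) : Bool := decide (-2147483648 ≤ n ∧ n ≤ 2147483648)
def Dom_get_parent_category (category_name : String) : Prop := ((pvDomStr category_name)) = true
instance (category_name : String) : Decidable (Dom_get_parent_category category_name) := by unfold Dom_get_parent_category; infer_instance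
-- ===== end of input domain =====

-- B replaces A's per-call loop over the nested parent->children dict (plus key fallback) by one
-- precomputed flat child-or-key -> parent table and a single lookup (simpler; children are unique
-- across parents and every key maps to itself, so the results coincide).

-- ===== PORT A =====
-- A's category_dict literal (insertion order kept)
def pvCategoryDict : List (String × List String) := [
  ("Wholesale - Flower", ["Tops", "Tops - THC", "Smalls", "In the Field", "Flower - Tops", "Flower - Small", "Flower - Bucked Untrimmed", "Flower - Bucked Untrimmed - Seeded", "Flower - Bucked Untrimmed - Contaminated"]),
  ("Wholesale - Trim", ["Trim - THC", "Trim - CBD", "Trim"]),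
  ("Bucked Untrimmed", ["Bucked Untrimmed"]),
  ("Wholesale - Concentrates", ["Crude Oil", "Crude Oil - THC", "Crude Oil - CBD", "Distillate Oil", "Distillate Oil - THC", "Distillate Oil - THC - First Pass", "Distillate Oil - THC - Second Pass", "Distillate Oil - CBD", "Shatter", "Sauce", "Crumbe", "Crumble", "Kief", "Hash"]),
  ("Waste", ["Distillate Waste"]),
  ("Lab Testing", ["Lab Testing"]),
  ("Wholesale - Terpenes", ["Terpenes - Cultivar Specific", "Terpenes - Cultivar Blended"]),
  ("Wholesale - Isolates", ["Isolates - CBD", "Isolates - THC", "Isolates - CBG", "Isolates - CBN"]),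
  ("Services", ["QC", "Transport", "Secure Cash Handling", "Services"]),
  ("Packaged Goods", ["Packaged Goods"])]

-- A's loop: first (k, v) with category_name in v, returning k
def pvScanA (category_name : String) : List (String × List String) → Option String
  | [] => none
  | (k, v) :: rest => if category_name ∈ v then some k else pvScanA category_name rest

def get_parent_category (category_name : String) : Option String :=
  match pvScanA category_name pvCategoryDict with
  | some k => some k
  | none =>
      if category_name ∈ pvCategoryDict.map (·.1) then some category_name else none

-- ===== PORT B =====
-- B's module-level flat table PARENT_OF (a dict literal; insertion order as written in Source B)
def pvParentOf : PySem.Dict String String := PySem.Dict.ofList [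
  ("Tops", "Wholesale - Flower"), ("Tops - THC", "Wholesale - Flower"), ("Smalls", "Wholesale - Flower"),
  ("In the Field", "Wholesale - Flower"), ("Flower - Tops", "Wholesale - Flower"), ("Flower - Small", "Wholesale - Flower"),
  ("Flower - Bucked Untrimmed", "Wholesale - Flower"), ("Flower - Bucked Untrimmed - Seeded", "Wholesale - Flower"),
  ("Flower - Bucked Untrimmed - Contaminated", "Wholesale - Flower"), ("Trim - THC", "Wholesale - Trim"),
  ("Trim - CBD", "Wholesale - Trim"), ("Trim", "Wholesale - Trim"), ("Bucked Untrimmed", "Bucked Untrimmed"),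
  ("Crude Oil", "Wholesale - Concentrates"), ("Crude Oil - THC", "Wholesale - Concentrates"),
  ("Crude Oil - CBD", "Wholesale - Concentrates"), ("Distillate Oil", "Wholesale - Concentrates"),
  ("Distillate Oil - THC", "Wholesale - Concentrates"), ("Distillate Oil - THC - First Pass", "Wholesale - Concentrates"),
  ("Distillate Oil - THC - Second Pass", "Wholesale - Concentrates"), ("Distillate Oil - CBD", "Wholesale - Concentrates"),
  ("Shatter", "Wholesale - Concentrates"), ("Sauce", "Wholesale - Concentrates"), ("Crumbe", "Wholesale - Concentrates"),
  ("Crumble", "Wholesale - Concentrates"), ("Kief", "Wholesale - Concentrates"), ("Hash", "Wholesale - Concentrates"),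
  ("Distillate Waste", "Waste"), ("Lab Testing", "Lab Testing"),
  ("Terpenes - Cultivar Specific", "Wholesale - Terpenes"), ("Terpenes - Cultivar Blended", "Wholesale - Terpenes"),
  ("Isolates - CBD", "Wholesale - Isolates"), ("Isolates - THC", "Wholesale - Isolates"),
  ("Isolates - CBG", "Wholesale - Isolates"), ("Isolates - CBN", "Wholesale - Isolates"),
  ("QC", "Services"), ("Transport", "Services"), ("Secure Cash Handling", "Services"), ("Services", "Services"),
  ("Packaged Goods", "Packaged Goods"), ("Wholesale - Flower", "Wholesale - Flower"),
  ("Wholesale - Trim", "Wholesale - Trim"), ("Wholesale - Concentrates", "Wholesale - Concentrates"),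
  ("Waste", "Waste"), ("Wholesale - Terpenes", "Wholesale - Terpenes"), ("Wholesale - Isolates", "Wholesale - Isolates")]

-- PARENT_OF.get(category_name)
def get_parent_category_alt (category_name : String) : Option String :=
  pvParentOf.get? category_name

-- ===== PRECONDITION & SPEC =====
def Spec_get_parent_category (category_name : String) (out : Option String) : Prop := out = get_parent_category_alt category_name
instance (category_name : String) (out : Option String) : Decidable (Spec_get_parent_category category_name out) := by unfold Spec_get_parent_category; infer_instance

-- ===== CLAIM (what is proved, stated in full; the proofs are below) =====
def Claim_equal_get_parent_category : Prop := ∀ (category_name : String), Dom_get_parent_category category_name → Spec_get_parent_category category_name (get_parent_category category_name)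

-- ===== LEMMAS AND PROOFS =====

-- the 46 names PARENT_OF knows (= all children and all keys of category_dict)
def pvAllNames : List String :=
  ["Tops", "Tops - THC", "Smalls", "In the Field", "Flower - Tops", "Flower - Small",
   "Flower - Bucked Untrimmed", "Flower - Bucked Untrimmed - Seeded",
   "Flower - Bucked Untrimmed - Contaminated", "Trim - THC", "Trim - CBD", "Trim",
   "Bucked Untrimmed", "Crude Oil", "Crude Oil - THC", "Crude Oil - CBD", "Distillate Oil",
   "Distillate Oil - THC", "Distillate Oil - THC - First Pass",
   "Distillate Oil - THC - Second Pass", "Distillate Oil - CBD", "Shatter", "Sauce",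
   "Crumbe", "Crumble", "Kief", "Hash", "Distillate Waste", "Lab Testing",
   "Terpenes - Cultivar Specific", "Terpenes - Cultivar Blended", "Isolates - CBD",
   "Isolates - THC", "Isolates - CBG", "Isolates - CBN", "QC", "Transport",
   "Secure Cash Handling", "Services", "Packaged Goods", "Wholesale - Flower",
   "Wholesale - Trim", "Wholesale - Concentrates", "Waste", "Wholesale - Terpenes",
   "Wholesale - Isolates"]

-- if category_name is in none of the children lists, A's scan returns none
theorem pvScanA_eq_none (n : String) (L : List (String × List String))
    (h : ∀ p ∈ L, n ∉ p.2) : pvScanA n L = none := by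
  induction L with
  | nil => rfl
  | cons p rest ih =>
      obtain ⟨k, v⟩ := p
      simp only [pvScanA]
      rw [if_neg (h (k, v) (List.mem_cons_self))]
      exact ih (fun q hq => h q (List.mem_cons_of_mem _ hq))

set_option maxRecDepth 16384 in
theorem pvKeys_parentOf : pvParentOf.keys = pvAllNames := by decide

set_option maxRecDepth 16384 in
theorem pvChildren_sub (p : String × List String) (hp : p ∈ pvCategoryDict) :
    ∀ c ∈ p.2, c ∈ pvAllNames := by
  fin_cases hp <;> (intro c hc; fin_cases hc <;> decide)

set_option maxRecDepth 16384 in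
theorem pvKeys_sub (k : String) (hk : k ∈ pvCategoryDict.map (·.1)) : k ∈ pvAllNames := by
  fin_cases hk <;> decide

set_option maxRecDepth 16384 in
theorem pvMain (n : String) : get_parent_category n = get_parent_category_alt n := by
  by_cases hc : n ∈ pvAllNames
  · fin_cases hc <;> decide
  · unfold get_parent_category get_parent_category_alt
    rw [pvScanA_eq_none n pvCategoryDict
      (fun p hp hn => hc (pvChildren_sub p hp n hn))]
    rw [if_neg (fun hk => hc (pvKeys_sub n hk))]
    rw [eq_comm, PySem.Dict.get?_eq_none_iff_not_mem_keys, pvKeys_parentOf]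
    exact hc

-- ===== VERDICT (by name: the statement is the Claim_ definition above) =====
theorem get_parent_category_spec : Claim_equal_get_parent_category := by
  intro n _
  exact pvMain n
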